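-- pv_equiv track=rewrite | github.com/ChidinmaKO/Chobe-Py-Challenges | bites/bite029.py | get_index_different_char
-- ===== SOURCE A (Python) =====
-- def get_index_different_char(chars):
--     alnum = []
--     not_alnum = []
--
--     for index, char in enumerate(chars):
--         if str(char).isalnum():
--             alnum.append(index)
--         else:
--             not_alnum.append(index)
--     result = alnum[0] if len(alnum) < len(not_alnum) else not_alnum[0]
--     return result
-- ===== SOURCE B (Python) =====
-- def get_index_different_char(chars):
--     flags = [str(char).isalnum() for char in chars]
--     minority_alnum = 2 * sum(flags) < len(flags)
--     return flags.index(minority_alnum)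
-- ===== Notes on version B (the rewrite author's own statement) =====
-- stated objective: idiomatic
-- what changed: B projects the input to a boolean flags list, decides the minority class with the arithmetic test 2*sum(flags) < len(flags) (tie keeps non-alnum), and locates the answer with the built-in list.index instead of A's enumerate loop that accumulates two index lists and heads one of them.
import Mathlib
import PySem

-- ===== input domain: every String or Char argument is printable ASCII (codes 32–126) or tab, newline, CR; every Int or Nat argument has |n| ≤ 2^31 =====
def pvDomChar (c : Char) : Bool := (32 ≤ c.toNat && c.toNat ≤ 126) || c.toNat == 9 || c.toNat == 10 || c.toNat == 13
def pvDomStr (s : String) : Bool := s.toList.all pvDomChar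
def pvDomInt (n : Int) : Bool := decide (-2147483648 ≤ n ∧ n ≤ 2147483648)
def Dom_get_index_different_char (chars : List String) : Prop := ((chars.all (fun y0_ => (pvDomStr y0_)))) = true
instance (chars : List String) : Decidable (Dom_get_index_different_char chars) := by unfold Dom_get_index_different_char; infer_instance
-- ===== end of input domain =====

-- B: map the input to a boolean flags list, pick the minority class by the arithmetic test
-- 2*sum < len (tie keeps non-alnum, as in A), and locate the answer with list.index —
-- instead of A's enumerate loop accumulating two index lists and heading one of them.
-- A raises IndexError when the selected minority group is empty (empty list, all-alnum or
-- all-non-alnum input); B raises ValueError there; Pre_ excludes exactly those inputs.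
-- ===== PORT A =====
def get_index_different_char (chars : List String) : Int :=
  let r := (PySem.List.enumerate chars).foldl
    (fun (acc : List Int × List Int) p =>
      if PySem.Str.strIsalnum p.2 then (acc.1 ++ [p.1], acc.2) else (acc.1, acc.2 ++ [p.1]))
    ([], [])
  if r.1.length < r.2.length then (PySem.List.pyGet? r.1 0).getD 0
  else (PySem.List.pyGet? r.2 0).getD 0

-- ===== PORT B =====
def get_index_different_char_alt (chars : List String) : Int :=
  let flags := chars.map (fun c => PySem.Str.strIsalnum c)
  let minorityAlnum : Bool := decide (2 * ((flags.count true : Nat) : Int) < (flags.length : Int))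
  ((PySem.List.index? flags minorityAlnum).map (Int.ofNat)).getD 0

-- ===== PRECONDITION & SPEC =====
-- Pre_: A returns normally iff the list has both an alnum and a non-alnum element;
-- otherwise the selected index list is empty and A raises IndexError (B: ValueError).
def Pre_get_index_different_char (chars : List String) : Prop :=
  (∃ c ∈ chars, PySem.Str.strIsalnum c = true) ∧ (∃ c ∈ chars, PySem.Str.strIsalnum c = false)
instance (chars : List String) : Decidable (Pre_get_index_different_char chars) := by
  unfold Pre_get_index_different_char; infer_instance
def pvWitness_get_index_different_char : List String := ["a", " "]
def Spec_get_index_different_char (chars : List String) (out : Int) : Prop := out = get_index_different_char_alt chars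
instance (chars : List String) (out : Int) : Decidable (Spec_get_index_different_char chars out) := by unfold Spec_get_index_different_char; infer_instance

-- ===== CLAIM (what is proved, stated in full; the proofs are below) =====
def Claim_equal_get_index_different_char : Prop := ∀ (chars : List String), Dom_get_index_different_char chars → Pre_get_index_different_char chars → Spec_get_index_different_char chars (get_index_different_char chars)

-- ===== LEMMAS AND PROOFS =====
-- A's foldl builds exactly the two filtered index lists.
theorem foldl_two_lists (l : List (Int × String)) :
    ∀ (a b : List Int),
    l.foldl (fun (acc : List Int × List Int) p =>
      if PySem.Chars.strIsalnum p.2.toList then (acc.1 ++ [p.1], acc.2) else (acc.1, acc.2 ++ [p.1]))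
      (a, b)
    = (a ++ (l.filter (fun p => PySem.Chars.strIsalnum p.2.toList)).map Prod.fst,
       b ++ (l.filter (fun p => !PySem.Chars.strIsalnum p.2.toList)).map Prod.fst) := by
  induction l with
  | nil => simp
  | cons x xs ih =>
    intro a b
    by_cases h : PySem.Chars.strIsalnum x.2.toList
    · simp [List.foldl_cons, h, ih]
    · simp [List.foldl_cons, h, ih]

-- head of the filtered index list = first index whose flag equals b, offset by the start.
theorem head_filter_enum (q : String → Bool) (b : Bool) (l : List String) :
    ∀ (s : Int),
    (((PySem.List.enumerate l s).filter (fun p => q p.2 == b)).map Prod.fst)[0]?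
      = (PySem.List.index? (l.map q) b).map (fun k => s + (k : Int)) := by
  induction l with
  | nil => intro s; simp [PySem.List.enumerate_nil, PySem.List.index?_eq_idxOf?]
  | cons x xs ih =>
    intro s
    by_cases h : q x = b
    · subst h
      rw [PySem.List.enumerate_cons]
      simp only [List.map_cons, PySem.List.index?_cons_self]
      simp
    · rw [PySem.List.enumerate_cons, List.map_cons,
        PySem.List.index?_cons_of_ne _ h]
      simp only [List.filter_cons]
      rw [if_neg (by simp [h])]
      rw [ih (s + 1)]
      cases hk : PySem.List.index? (xs.map q) b with
      | none => simp
      | some k => simp; ring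

theorem filter_enumerate_length (q : String → Bool) (l : List String) :
    ∀ (s : Int),
    ((PySem.List.enumerate l s).filter (fun p => q p.2)).length = (l.filter q).length := by
  induction l with
  | nil => intro s; simp [PySem.List.enumerate_nil]
  | cons x xs ih =>
    intro s
    by_cases h : q x
    · simp [PySem.List.enumerate_cons, h, ih]
    · simp [PySem.List.enumerate_cons, h, ih]

theorem filter_len_add (q : String → Bool) (l : List String) :
    (l.filter q).length + (l.filter (fun c => !q c)).length = l.length := by
  induction l with
  | nil => simp
  | cons x xs ih =>
    by_cases h : q x <;> simp [h] <;> omega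

theorem foldl_two_lists_str (l : List (Int × String)) (a b : List Int) :
    l.foldl (fun (acc : List Int × List Int) p =>
      if PySem.Str.strIsalnum p.2 then (acc.1 ++ [p.1], acc.2) else (acc.1, acc.2 ++ [p.1]))
      (a, b)
    = (a ++ (l.filter (fun p => PySem.Str.strIsalnum p.2)).map Prod.fst,
       b ++ (l.filter (fun p => !PySem.Str.strIsalnum p.2)).map Prod.fst) :=
  foldl_two_lists l a b

-- count true over the flags list = number of alnum elements.
theorem count_true_map (q : String → Bool) (l : List String) :
    (l.map q).count true = (l.filter q).length := by
  induction l with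
  | nil => simp
  | cons x xs ih =>
    by_cases h : q x <;> simp [h, ih]

theorem pyGet?_zero {α : Type} (l : List α) : PySem.List.pyGet? l 0 = l[0]? := by
  simp only [PySem.List.pyGet?, PySem.List.pyIdx?]
  split
  · cases l with
    | nil => simp
    | cons x xs => simp [Option.bind]
  · cases l with
    | nil => simp
    | cons x xs => simp_all

-- ===== VERDICT (by name: the statement is the Claim_ definition above) =====
theorem get_index_different_char_spec : Claim_equal_get_index_different_char := by
  intro chars _ _
  simp only [Spec_get_index_different_char, get_index_different_char,
    get_index_different_char_alt]
  rw [foldl_two_lists_str (PySem.List.enumerate chars) [] []]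
  simp only [List.nil_append, List.length_map, count_true_map]
  have hlen := filter_len_add (fun c => PySem.Str.strIsalnum c) chars
  have he1 := filter_enumerate_length (fun c => PySem.Str.strIsalnum c) chars 0
  have he2 := filter_enumerate_length (fun c => !PySem.Str.strIsalnum c) chars 0
  have hh1 := head_filter_enum (fun c => PySem.Str.strIsalnum c) true chars 0
  have hh2 := head_filter_enum (fun c => PySem.Str.strIsalnum c) false chars 0
  simp only [beq_true, beq_false] at hh1 hh2
  by_cases hc : 2 * (((chars.filter (fun c => PySem.Str.strIsalnum c)).length : Nat) : Int)
      < (chars.length : Int)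
  · have hnat : ((PySem.List.enumerate chars 0).filter (fun p => PySem.Str.strIsalnum p.2)).length
        < ((PySem.List.enumerate chars 0).filter (fun p => !PySem.Str.strIsalnum p.2)).length := by
      rw [he1, he2]; omega
    rw [decide_eq_true hc, if_pos hnat, pyGet?_zero, hh1]
    cases hk : PySem.List.index? (chars.map (fun c => PySem.Str.strIsalnum c)) true with
    | none => simp
    | some k => simp
  · have hnat : ¬ ((PySem.List.enumerate chars 0).filter (fun p => PySem.Str.strIsalnum p.2)).length
        < ((PySem.List.enumerate chars 0).filter (fun p => !PySem.Str.strIsalnum p.2)).length := by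
      rw [he1, he2]; omega
    rw [decide_eq_false hc, if_neg hnat, pyGet?_zero, hh2]
    cases hk : PySem.List.index? (chars.map (fun c => PySem.Str.strIsalnum c)) false with
    | none => simp
    | some k => simp
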